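-- pv_equiv track=rewrite | github.com/melazyk/fifa | fifa.py | delta_by_price
-- ===== SOURCE A (Python) =====
-- def delta_by_price(price):
--     steps = (
--         (1000, 50),
--         (10000, 100),
--         (50000, 250),
--         (100000, 500),
--         (1000000, 1000),
--     )
--
--     for step in steps:
--         if price < step[0]:
--             return step[1]
--
--     return 0
-- ===== SOURCE B (Python) =====
-- def delta_by_price(price):
--     thresholds = [1000, 10000, 50000, 100000, 1000000]
--     deltas = [50, 100, 250, 500, 1000]
--     lo, hi = 0, len(thresholds)
--     while lo < hi:
--         mid = (lo + hi) // 2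
--         if thresholds[mid] <= price:
--             lo = mid + 1
--         else:
--             hi = mid
--     return deltas[lo] if lo < len(deltas) else 0
-- ===== Notes on version B (the rewrite author's own statement) =====
-- stated objective: alternative
-- what changed: Replaces the sequential scan over threshold/delta tuples with a hand-written binary search (bisect_right) over a sorted threshold list indexing a parallel delta list.
import Mathlib
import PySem

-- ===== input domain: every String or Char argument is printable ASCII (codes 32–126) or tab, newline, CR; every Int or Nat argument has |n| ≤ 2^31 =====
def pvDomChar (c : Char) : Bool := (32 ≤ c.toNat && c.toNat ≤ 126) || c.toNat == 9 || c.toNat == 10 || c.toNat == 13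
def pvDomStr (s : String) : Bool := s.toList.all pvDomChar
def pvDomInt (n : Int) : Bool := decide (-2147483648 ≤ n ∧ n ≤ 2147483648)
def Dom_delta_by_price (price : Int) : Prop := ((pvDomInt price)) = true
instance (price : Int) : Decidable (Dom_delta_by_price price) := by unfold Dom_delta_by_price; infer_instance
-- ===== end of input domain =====

-- B replaces A's sequential scan of threshold/delta tuples with a binary search over a
-- sorted threshold list indexing a parallel delta list; same value on every Int.
-- ===== PORT A =====
-- the 'for step in steps: if price < step[0]: return step[1]' loop, first match wins
def pvLoopA (price : Int) : List (Int × Int) → Int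
  | [] => 0
  | s :: rest => if price < s.1 then s.2 else pvLoopA price rest

def delta_by_price (price : Int) : Int :=
  pvLoopA price [(1000, 50), (10000, 100), (50000, 250), (100000, 500), (1000000, 1000)]

-- ===== PORT B =====
-- the 'while lo < hi' binary-search loop of Source B; thresholds[mid] is always in range
-- (0 ≤ lo ≤ mid < hi ≤ 5), ported with getD
def pvBisect (thresholds : List Int) (price : Int) (lo hi : Nat) : Nat :=
  if h : lo < hi then
    let mid := (lo + hi) / 2
    if thresholds.getD mid 0 ≤ price then pvBisect thresholds price (mid + 1) hi
    else pvBisect thresholds price lo mid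
  else lo
termination_by hi - lo
decreasing_by all_goals omega

def delta_by_price_alt (price : Int) : Int :=
  let thresholds : List Int := [1000, 10000, 50000, 100000, 1000000]
  let deltas : List Int := [50, 100, 250, 500, 1000]
  let lo := pvBisect thresholds price 0 thresholds.length
  if lo < deltas.length then deltas.getD lo 0 else 0

-- ===== PRECONDITION & SPEC =====
def Spec_delta_by_price (price : Int) (out : Int) : Prop := out = delta_by_price_alt price
instance (price : Int) (out : Int) : Decidable (Spec_delta_by_price price out) := by unfold Spec_delta_by_price; infer_instance

-- ===== CLAIM (what is proved, stated in full; the proofs are below) =====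
def Claim_equal_delta_by_price : Prop := ∀ (price : Int), Dom_delta_by_price price → Spec_delta_by_price price (delta_by_price price)

-- ===== LEMMAS AND PROOFS =====

-- ===== VERDICT (by name: the statement is the Claim_ definition above) =====
theorem delta_by_price_spec : Claim_equal_delta_by_price := by
  intro price _
  unfold Spec_delta_by_price delta_by_price delta_by_price_alt
  by_cases c1 : (1000:Int) ≤ price <;> by_cases c2 : (10000:Int) ≤ price <;>
    by_cases c3 : (50000:Int) ≤ price <;> by_cases c4 : (100000:Int) ≤ price <;>
    by_cases c5 : (1000000:Int) ≤ price <;>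
    first
      | (exfalso; omega)
      | (simp only []
         rw [pvBisect]; simp only [List.getD]; norm_num [c1, c2, c3, c4, c5]
         repeat (first
           | (rw [pvBisect]; simp only [List.getD]; norm_num [c1, c2, c3, c4, c5])
           | rfl)
         simp only [pvLoopA]
         split_ifs <;> omega)
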